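-- pv_equiv track=rewrite | github.com/cha0s89/mlb-prop-predictor | src/parlay_suggest.py | _is_valid_slip
-- ===== SOURCE A (Python) =====
-- from collections import Counter, defaultdict
--
-- def _pick_player_key(pick: dict) -> str:
--     """Stable player identity for reuse checks."""
--     return str(pick.get("player_name", "")).strip().lower()
--
-- def _is_valid_slip(picks: list[dict], slip_size: int) -> bool:
--     """
--     Validate that a slip meets diversity constraints.
--
--     Rules:
--     - Exactly slip_size picks
--     - Max 2 picks from the same team
--
--     Args:
--         picks: List of prediction dicts
--         slip_size: Expected number of picks
--
--     Returns:
--         bool: True if valid, False otherwise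
--     """
--     if len(picks) != slip_size:
--         return False
--
--     players = [_pick_player_key(p) for p in picks if _pick_player_key(p)]
--     if len(players) != len(set(players)):
--         return False
--
--     # Max 2 from same team
--     teams = [p.get('team') for p in picks]
--     team_counts = Counter(teams)
--     if any(count > 2 for count in team_counts.values()):
--         return False
--
--     return True
-- ===== SOURCE B (Python) =====
-- def _pick_player_key(pick: dict) -> str:
--     """Stable player identity for reuse checks."""
--     return str(pick.get("player_name", "")).strip().lower()
--
-- def _is_valid_slip(picks, slip_size):
--     """Single-pass validation: one loop with a seen-set and running team counts, early exit."""
--     if len(picks) != slip_size: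
--         return False
--     seen = set()
--     team_counts = {}
--     for p in picks:
--         k = _pick_player_key(p)
--         if k:
--             if k in seen:
--                 return False
--             seen.add(k)
--         t = p.get('team')
--         c = team_counts.get(t, 0) + 1
--         if c > 2:
--             return False
--         team_counts[t] = c
--     return True
-- ===== Notes on version B (the rewrite author's own statement) =====
-- stated objective: alternative
-- what changed: Replaced A's three separate passes (build player-key list and compare against its set, build team list, Counter + any) with a single loop over picks maintaining a seen-set of player keys and running team counts, returning False at the first violation.
import Mathlib
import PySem

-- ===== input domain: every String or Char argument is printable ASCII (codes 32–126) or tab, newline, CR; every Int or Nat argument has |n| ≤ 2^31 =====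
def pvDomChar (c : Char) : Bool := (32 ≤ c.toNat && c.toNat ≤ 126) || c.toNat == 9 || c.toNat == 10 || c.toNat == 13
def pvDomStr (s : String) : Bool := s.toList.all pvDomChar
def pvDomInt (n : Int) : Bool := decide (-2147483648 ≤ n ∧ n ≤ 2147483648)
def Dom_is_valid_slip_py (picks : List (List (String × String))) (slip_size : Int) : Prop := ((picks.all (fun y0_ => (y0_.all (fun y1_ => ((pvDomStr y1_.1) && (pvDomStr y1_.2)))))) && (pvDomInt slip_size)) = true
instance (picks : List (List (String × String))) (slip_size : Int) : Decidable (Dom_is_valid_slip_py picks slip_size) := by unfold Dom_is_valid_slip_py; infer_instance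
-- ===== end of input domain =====

-- B validates in ONE pass over the picks with a seen-set and running team counts (early exit),
-- instead of A's three passes (player list + set, team list, Counter). Objective: alternative decomposition.

-- ===== PORT A =====
-- _pick_player_key: str(pick.get("player_name", "")).strip().lower()  (values are strings, str() is the identity)
def pickKey (p : List (String × String)) : List Char :=
  PySem.Chars.lower (PySem.Chars.strip ((PySem.Dict.getD (PySem.Dict.mk p) "player_name" "").toList))

-- players = [_pick_player_key(p) for p in picks if _pick_player_key(p)]
def playersOf (l : List (List (String × String))) : List (List Char) :=
  (l.filter (fun p => pickKey p ≠ ([] : List Char))).map pickKey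
-- teams = [p.get('team') for p in picks]
def teamsOf (l : List (List (String × String))) : List (Option String) :=
  l.map (fun p => PySem.Dict.get? (PySem.Dict.mk p) "team")

def is_valid_slip_py (picks : List (List (String × String))) (slip_size : Int) : Bool :=
  if (picks.length : Int) ≠ slip_size then false
  else if (playersOf picks).length ≠ (PySem.Set.ofList (playersOf picks)).length then false
  else if (PySem.Dict.counter (teamsOf picks)).values.any (fun c => c > 2) then false
  else true

-- ===== PORT B =====
def slipLoop : List (List (String × String)) → PySem.Set (List Char) → PySem.Dict (Option String) Int → Bool
  | [], _, _ => true
  | p :: rs, seen, counts =>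
    let k := pickKey p
    if k ≠ ([] : List Char) ∧ k ∈ seen then false
    else
      let seen' := if k ≠ ([] : List Char) then PySem.Set.add seen k else seen
      let t := PySem.Dict.get? (PySem.Dict.mk p) "team"
      let c := counts.getD t 0 + 1
      if c > 2 then false else slipLoop rs seen' (counts.insert t c)

def is_valid_slip_py_alt (picks : List (List (String × String))) (slip_size : Int) : Bool :=
  if (picks.length : Int) ≠ slip_size then false
  else slipLoop picks PySem.Set.empty PySem.Dict.empty

-- ===== PRECONDITION & SPEC =====
def Spec_is_valid_slip_py (picks : List (List (String × String))) (slip_size : Int) (out : Bool) : Prop := out = is_valid_slip_py_alt picks slip_size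
instance (picks : List (List (String × String))) (slip_size : Int) (out : Bool) : Decidable (Spec_is_valid_slip_py picks slip_size out) := by unfold Spec_is_valid_slip_py; infer_instance

-- ===== CLAIM (what is proved, stated in full; the proofs are below) =====
def Claim_equal_is_valid_slip_py : Prop := ∀ (picks : List (List (String × String))) (slip_size : Int), Dom_is_valid_slip_py picks slip_size → Spec_is_valid_slip_py picks slip_size (is_valid_slip_py picks slip_size)

-- ===== LEMMAS AND PROOFS =====


lemma length_ofList_eq_dedup (xs : List (List Char)) :
    (PySem.Set.ofList xs).length = xs.dedup.length := by
  rw [← List.card_toFinset]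
  rw [← List.toFinset_card_of_nodup (PySem.Set.nodup_ofList xs)]
  congr 1
  ext a
  simp [PySem.Set.mem_ofList]

lemma length_ofList_eq_iff_nodup (xs : List (List Char)) :
    xs.length = (PySem.Set.ofList xs).length ↔ xs.Nodup := by
  rw [length_ofList_eq_dedup]
  constructor
  · intro h
    have he := List.Sublist.eq_of_length (List.dedup_sublist xs) h.symm
    rw [← he]; exact List.nodup_dedup xs
  · intro h; rw [List.dedup_eq_self.mpr h]

lemma counter_any_false_iff (teams : List (Option String)) :
    ((PySem.Dict.counter teams).values.any (fun c => c > 2) = false) ↔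
      ∀ t, ((teams.count t : Int) ≤ 2) := by
  have hv : (PySem.Dict.counter teams).values
      = (PySem.Set.ofList teams).map (fun k => (teams.count k : Int)) := by
    show (PySem.Dict.counter teams).items.map (·.2) = _
    rw [PySem.Dict.items_counter]
    simp
  rw [hv, List.any_map, List.any_eq_false]
  constructor
  · intro h t
    by_cases hm : t ∈ teams
    · have := h t ((PySem.Set.mem_ofList _ _).mpr hm)
      simpa using this
    · simp [List.count_eq_zero_of_not_mem hm]
  · intro h k _
    simpa using h k

-- invariant of B's single pass: it succeeds iff the pending player keys are fresh and distinct
-- and no team total ever exceeds 2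
lemma slipLoop_true_iff (rest : List (List (String × String)))
    (seen : PySem.Set (List Char)) (counts : PySem.Dict (Option String) Int)
    (hc : ∀ t, counts.getD t 0 ≤ 2) :
    slipLoop rest seen counts = true ↔
      ((playersOf rest).Nodup ∧ ∀ k ∈ playersOf rest, k ∉ seen) ∧
        ∀ t, counts.getD t 0 + ((teamsOf rest).count t : Int) ≤ 2 := by
  induction rest generalizing seen counts with
  | nil =>
    simp [slipLoop, playersOf, teamsOf]
    intro t; simpa using hc t
  | cons p rs ih =>
    have hpc : pickKey p ≠ ([]:List Char) → playersOf (p :: rs) = pickKey p :: playersOf rs := by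
      intro h; simp [playersOf, h]
    have hps : pickKey p = ([]:List Char) → playersOf (p :: rs) = playersOf rs := by
      intro h; simp [playersOf, h]
    have htc : ∀ t : Option String, ((teamsOf (p :: rs)).count t : Int)
        = (if t = PySem.Dict.get? (PySem.Dict.mk p) "team" then 1 else 0) + ((teamsOf rs).count t : Int) := by
      intro t
      simp only [teamsOf, List.map_cons, List.count_cons]
      by_cases hq : t = PySem.Dict.get? (PySem.Dict.mk p) "team"
      · simp [hq]; omega
      · simp [hq]; exact fun h => hq h.symm
    by_cases hk : pickKey p ≠ ([]:List Char) ∧ pickKey p ∈ seen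
    · have hL : slipLoop (p :: rs) seen counts = false := by
        simp only [slipLoop]
        rw [if_pos hk]
      rw [hL]
      simp only [Bool.false_eq_true, false_iff]
      rintro ⟨⟨_, hall⟩, _⟩
      exact hall _ (by rw [hpc hk.1]; exact List.mem_cons_self) hk.2
    · by_cases h2 : counts.getD (PySem.Dict.get? (PySem.Dict.mk p) "team") 0 + 1 > 2
      · have hL : slipLoop (p :: rs) seen counts = false := by
          simp only [slipLoop]
          rw [if_neg hk, if_pos h2]
        rw [hL]
        simp only [Bool.false_eq_true, false_iff]
        rintro ⟨-, hcnt⟩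
        have h1 : (1 : Int) ≤ ((teamsOf (p :: rs)).count (PySem.Dict.get? (PySem.Dict.mk p) "team") : Int) := by
          rw [htc]; simp
        have := hcnt (PySem.Dict.get? (PySem.Dict.mk p) "team")
        omega
      · have hL : slipLoop (p :: rs) seen counts
            = slipLoop rs (if pickKey p ≠ ([]:List Char) then PySem.Set.add seen (pickKey p) else seen)
                (counts.insert (PySem.Dict.get? (PySem.Dict.mk p) "team")
                  (counts.getD (PySem.Dict.get? (PySem.Dict.mk p) "team") 0 + 1)) := by
          simp only [slipLoop]
          rw [if_neg hk, if_neg h2]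
        have hc' : ∀ t, ((counts.insert (PySem.Dict.get? (PySem.Dict.mk p) "team")
            (counts.getD (PySem.Dict.get? (PySem.Dict.mk p) "team") 0 + 1)).getD t 0) ≤ 2 := by
          intro t; rw [PySem.Dict.getD_insert]
          split_ifs with he
          · rw [he] at *; omega
          · exact hc t
        rw [hL, ih _ _ hc']
        have hcnt_iff : (∀ t, ((counts.insert (PySem.Dict.get? (PySem.Dict.mk p) "team")
              (counts.getD (PySem.Dict.get? (PySem.Dict.mk p) "team") 0 + 1)).getD t 0)
              + ((teamsOf rs).count t : Int) ≤ 2)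
            ↔ ∀ t, counts.getD t 0 + ((teamsOf (p :: rs)).count t : Int) ≤ 2 := by
          constructor <;> intro h t <;> have ht := h t <;> rw [PySem.Dict.getD_insert] at * <;>
            rw [htc t] at * <;> split_ifs at * with he <;> simp [he] at * <;> omega
        rw [hcnt_iff]
        by_cases hkey : pickKey p ≠ ([]:List Char)
        · have hnotin : pickKey p ∉ seen := fun hmem => hk ⟨hkey, hmem⟩
          rw [hpc hkey]
          simp only [if_pos hkey, List.nodup_cons, List.mem_cons]
          constructor
          · rintro ⟨⟨hnd, hall⟩, hcnt⟩
            refine ⟨⟨⟨?_, hnd⟩, ?_⟩, hcnt⟩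
            · intro hmem
              have := hall _ hmem
              simp [PySem.Set.mem_add] at this
            · rintro k (rfl | hkm)
              · exact hnotin
              · intro hkseen
                have := hall _ hkm
                rw [PySem.Set.mem_add] at this
                exact this (Or.inl hkseen)
          · rintro ⟨⟨⟨hnin, hnd⟩, hall⟩, hcnt⟩
            refine ⟨⟨hnd, ?_⟩, hcnt⟩
            intro k hkm
            rw [PySem.Set.mem_add]
            rintro (hs | rfl)
            · exact hall k (Or.inr hkm) hs
            · exact hnin hkm
        · have hkey' : pickKey p = ([]:List Char) := not_not.mp hkey
          rw [hps hkey']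
          simp only [if_neg hkey]


lemma empty_counts_le (t : Option String) : (PySem.Dict.empty : PySem.Dict (Option String) Int).getD t 0 ≤ 2 := by
  simp [PySem.Dict.getD_empty]

-- ===== VERDICT (by name: the statement is the Claim_ definition above) =====
theorem is_valid_slip_py_spec : Claim_equal_is_valid_slip_py := by
  intro picks slip_size _
  unfold Spec_is_valid_slip_py is_valid_slip_py is_valid_slip_py_alt
  by_cases hlen : (picks.length : Int) ≠ slip_size
  · simp [hlen]
  · rw [if_neg hlen, if_neg hlen]
    rw [Bool.eq_iff_iff, slipLoop_true_iff picks PySem.Set.empty PySem.Dict.empty empty_counts_le]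
    show ((if (playersOf picks).length ≠ (PySem.Set.ofList (playersOf picks)).length then false
      else if (PySem.Dict.counter (teamsOf picks)).values.any (fun c => c > 2) then false
      else true) = true) ↔ ((playersOf picks).Nodup ∧ ∀ k ∈ playersOf picks, k ∉ PySem.Set.empty) ∧
      ∀ t, (PySem.Dict.empty : PySem.Dict (Option String) Int).getD t 0 + ((teamsOf picks).count t : Int) ≤ 2
    constructor
    · intro h
      split_ifs at h with h1 h2
      refine ⟨⟨(length_ofList_eq_iff_nodup _).mp (not_ne_iff.mp h1), ?_⟩, ?_⟩
      · intro k _ hk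
        simp [PySem.Set.empty] at hk
      · intro t
        have := (counter_any_false_iff (teamsOf picks)).mp (by simpa using h2)
        have ht := this t
        simp only [PySem.Dict.getD_empty]
        omega
    · rintro ⟨⟨hnd, -⟩, hcnt⟩
      have hany : ((PySem.Dict.counter (teamsOf picks)).values.any (fun c => c > 2)) = false := by
        refine (counter_any_false_iff (teamsOf picks)).mpr ?_
        intro t
        have := hcnt t
        simp only [PySem.Dict.getD_empty, zero_add] at this
        exact this
      rw [if_neg (not_ne_iff.mpr ((length_ofList_eq_iff_nodup (playersOf picks)).mpr hnd))]
      simp [hany]
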